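-- pv_equiv track=rewrite | github.com/Aqsa4066/Physical-and-DataLink-layer-Simulator | physical.py | ami
-- ===== SOURCE A (Python) =====
-- def ami(bits):
--     signal = []
--     level = 1
--
--     for bit in bits:
--         if bit == '1':
--             signal.append(level)
--             level *= -1
--         else:
--             signal.append(0)
--
--     return signal
-- ===== SOURCE B (Python) =====
-- def ami(bits):
--     b = list(bits)
--     sig = [0] * len(b)
--     ones = [i for i, c in enumerate(b) if c == '1']
--     for k, i in enumerate(ones):
--         sig[i] = 1 if k % 2 == 0 else -1
--     return sig
-- ===== Notes on version B (the rewrite author's own statement) =====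
-- stated objective: alternative
-- what changed: Instead of one flat pass flipping a running level, B preallocates a zero signal, collects the positions of the one-bits, and scatters alternating plus/minus pulses into those slots by rank parity.
import Mathlib
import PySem

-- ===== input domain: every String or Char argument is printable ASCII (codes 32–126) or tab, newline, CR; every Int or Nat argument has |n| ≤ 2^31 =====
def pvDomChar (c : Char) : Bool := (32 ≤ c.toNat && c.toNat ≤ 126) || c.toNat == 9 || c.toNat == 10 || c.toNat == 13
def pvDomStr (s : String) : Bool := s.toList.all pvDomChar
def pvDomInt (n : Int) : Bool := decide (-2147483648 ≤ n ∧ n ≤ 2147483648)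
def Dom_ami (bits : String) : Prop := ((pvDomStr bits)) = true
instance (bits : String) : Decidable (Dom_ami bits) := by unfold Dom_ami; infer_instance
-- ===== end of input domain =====

-- B replaces A's running-level flat pass by a preallocated zero signal into which
-- alternating +1/-1 are scattered at the positions of the '1' bits (alternative decomposition).

-- ===== PORT A =====
-- one pass, appending the current level at each '1' and flipping it
def ami (bits : String) : List Int :=
  (bits.toList.foldl
    (fun (s : List Int × Int) bit =>
      if bit = '1' then (s.1 ++ [s.2], s.2 * (-1)) else (s.1 ++ [0], s.2))
    (([] : List Int), (1 : Int))).1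

-- ===== PORT B =====
-- zero-filled signal; positions of '1' bits; scatter +1/-1 by rank parity
def ami_alt (bits : String) : List Int :=
  let b := bits.toList
  let signal := List.replicate b.length (0 : Int)
  let ones := ((PySem.List.enumerate b).filter (fun p => p.2 == '1')).map Prod.fst
  (PySem.List.enumerate ones).foldl
    (fun sig ki =>
      PySem.List.pySetD sig ki.2 (if PySem.Int.mod ki.1 2 == 0 then (1 : Int) else -1))
    signal

-- ===== PRECONDITION & SPEC =====
def Spec_ami (bits : String) (out : List Int) : Prop := out = ami_alt bits
instance (bits : String) (out : List Int) : Decidable (Spec_ami bits out) := by unfold Spec_ami; infer_instance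

-- ===== CLAIM (what is proved, stated in full; the proofs are below) =====
def Claim_equal_ami : Prop := ∀ (bits : String), Dom_ami bits → Spec_ami bits (ami bits)

-- ===== LEMMAS AND PROOFS =====

/-- the AMI encoding, as a structural recursion: reference semantics for both ports -/
def enc : List Char → Int → List Int
  | [], _ => []
  | c :: cs, lv => if c = '1' then lv :: enc cs (-lv) else 0 :: enc cs lv

/-- positions (from `s`) of the '1' chars -/
def onesOf (cs : List Char) (s : Int) : List Int :=
  ((PySem.List.enumerate cs s).filter (fun p => p.2 == '1')).map Prod.fst

/-- the sign assigned to the `k`-th one -/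
def sgn (k : Int) : Int := if PySem.Int.mod k 2 == 0 then 1 else -1

/-- B's scatter loop, with a general enumerate start -/
def scatter (sig : List Int) (ones : List Int) (k : Int) : List Int :=
  (PySem.List.enumerate ones k).foldl
    (fun sig ki => PySem.List.pySetD sig ki.2 (sgn ki.1)) sig

theorem onesOf_nil (s : Int) : onesOf [] s = [] := rfl

theorem onesOf_cons (c : Char) (cs : List Char) (s : Int) :
    onesOf (c :: cs) s = (if c = '1' then [s] else []) ++ onesOf cs (s + 1) := by
  simp only [onesOf, PySem.List.enumerate_cons, List.filter_cons]
  by_cases h : c = '1' <;> simp [h]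

theorem onesOf_shift (cs : List Char) : ∀ s : Int, onesOf cs s = (onesOf cs 0).map (· + s) := by
  induction cs with
  | nil => intro s; rfl
  | cons c cs ih =>
    intro s
    rw [onesOf_cons, onesOf_cons, ih (s := s + 1), ih (s := 0 + 1), List.map_append,
      List.map_map]
    congr 1
    · by_cases h : c = '1' <;> simp [h]
    · apply List.map_congr_left; intro a _; simp; omega

theorem onesOf_nonneg (cs : List Char) : ∀ s : Int, 0 ≤ s → ∀ i ∈ onesOf cs s, 0 ≤ i := by
  induction cs with
  | nil => intro s _ i hi; simp [onesOf_nil] at hi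
  | cons c cs ih =>
    intro s hs i hi
    rw [onesOf_cons] at hi
    rcases List.mem_append.1 hi with h | h
    · by_cases hc : c = '1' <;> simp [hc] at h; omega
    · exact ih (s + 1) (by omega) i h

theorem scatter_cons (sig : List Int) (i : Int) (ones : List Int) (k : Int) :
    scatter sig (i :: ones) k = scatter (PySem.List.pySetD sig i (sgn k)) ones (k + 1) := by
  simp [scatter, PySem.List.enumerate_cons]

theorem scatter_shift (ones : List Int) :
    ∀ (x : Int) (sig : List Int) (k : Int), (∀ i ∈ ones, 0 ≤ i) →
      scatter (x :: sig) (ones.map (· + 1)) k = x :: scatter sig ones k := by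
  induction ones with
  | nil => intro x sig k _; rfl
  | cons i rest ih =>
    intro x sig k hnn
    have hi : 0 ≤ i := hnn i (by simp)
    rw [List.map_cons, scatter_cons, scatter_cons]
    have hset : PySem.List.pySetD (x :: sig) (i + 1) (sgn k)
        = x :: PySem.List.pySetD sig i (sgn k) := by
      rw [PySem.List.pySetD_of_nonneg _ _ (by omega : (0:Int) ≤ i + 1),
        PySem.List.pySetD_of_nonneg _ _ hi]
      have h1 : (i + 1).toNat = i.toNat + 1 := by omega
      rw [h1]; rfl
    rw [hset, ih x _ (k + 1) (fun j hj => hnn j (by simp [hj]))]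

theorem mod_two_eq (a : Int) : PySem.Int.mod a 2 = a % 2 := by
  simp [PySem.Int.mod, Int.fmod_eq_emod]

theorem sgn_succ (k : Int) : sgn (k + 1) = -sgn k := by
  simp only [sgn, mod_two_eq]
  rcases Int.emod_two_eq_zero_or_one k with h | h
  · have h' : (k + 1) % 2 = 1 := by omega
    simp [h, h']
  · have h' : (k + 1) % 2 = 0 := by omega
    simp [h, h']

theorem scatter_enc (cs : List Char) :
    ∀ k : Int, scatter (List.replicate cs.length 0) (onesOf cs 0) k = enc cs (sgn k) := by
  induction cs with
  | nil => intro k; rfl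
  | cons c cs ih =>
    intro k
    have hnn : ∀ i ∈ onesOf cs 0, 0 ≤ i := onesOf_nonneg cs 0 le_rfl
    rw [onesOf_cons, onesOf_shift cs (0 + 1)]
    simp only [show (0 : Int) + 1 = 1 by norm_num, List.length_cons, List.replicate_succ]
    by_cases hc : c = '1'
    · rw [if_pos hc, List.singleton_append, scatter_cons]
      have hset : PySem.List.pySetD ((0 : Int) :: List.replicate cs.length 0) 0 (sgn k)
          = sgn k :: List.replicate cs.length 0 := by
        rw [PySem.List.pySetD_of_nonneg _ _ le_rfl]; rfl
      rw [hset, scatter_shift _ _ _ _ hnn, ih (k + 1), sgn_succ]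
      simp [enc, hc]
    · rw [if_neg hc, List.nil_append, scatter_shift _ _ _ _ hnn, ih k]
      simp [enc, hc]

theorem ami_enc (bits : String) :
    ami bits = enc bits.toList 1 := by
  suffices h : ∀ (cs : List Char) (acc : List Int) (lv : Int),
      (cs.foldl (fun (s : List Int × Int) bit =>
        if bit = '1' then (s.1 ++ [s.2], s.2 * (-1)) else (s.1 ++ [0], s.2)) (acc, lv)).1
      = acc ++ enc cs lv by
    simpa [ami] using h bits.toList [] 1
  intro cs
  induction cs with
  | nil => intro acc lv; simp [enc]
  | cons c cs ih =>
    intro acc lv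
    rw [List.foldl_cons]
    by_cases hc : c = '1'
    · rw [if_pos hc, ih, enc]
      simp [hc]
    · rw [if_neg hc, ih, enc]
      simp [hc]

theorem ami_alt_enc (bits : String) :
    ami_alt bits = enc bits.toList 1 := by
  have h := scatter_enc bits.toList 0
  have hsgn : sgn 0 = 1 := by decide
  rw [hsgn] at h
  calc ami_alt bits
      = scatter (List.replicate bits.toList.length 0) (onesOf bits.toList 0) 0 := by
        simp [ami_alt, scatter, onesOf, sgn]
    _ = enc bits.toList 1 := h

-- ===== VERDICT (by name: the statement is the Claim_ definition above) =====
theorem ami_spec : Claim_equal_ami := by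
  intro bits _
  unfold Spec_ami
  rw [ami_enc, ami_alt_enc]
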